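-- pv_equiv track=rewrite | github.com/IgorBarbashov/algorithms_and_data_structures | yandex_algorithms_tranings/lecture_04_dictionary_count_sort/03_dict_tasks.py | rookpairs
-- ===== SOURCE A (Python) =====
-- def rookpairs(rooks):
--     def addrook(dct, key):
--         if key not in dct:
--             dct[key] = 0
--         dct[key] += 1
--
--     def countpairs(dct):
--         pairs = 0
--         for key in dct:
--             pairs += dct[key] - 1
--         return pairs
--
--     dcti = {}
--     dctj = {}
--     for i, j in rooks:
--         addrook(dcti, i)
--         addrook(dctj, j)
--
--     return countpairs(dcti) + countpairs(dctj)
-- ===== SOURCE B (Python) =====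
-- def rookpairs(rooks):
--     rows = set()
--     cols = set()
--     n = 0
--     for i, j in rooks:
--         rows.add(i)
--         cols.add(j)
--         n += 1
--     return 2 * n - len(rows) - len(cols)
-- ===== Notes on version B (the rewrite author's own statement) =====
-- stated objective: simpler
-- what changed: Replaces the two frequency dictionaries and the separate pair-summation pass with one pass collecting distinct rows/cols into sets, returning the closed form 2*n - len(rows) - len(cols).
import Mathlib
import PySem

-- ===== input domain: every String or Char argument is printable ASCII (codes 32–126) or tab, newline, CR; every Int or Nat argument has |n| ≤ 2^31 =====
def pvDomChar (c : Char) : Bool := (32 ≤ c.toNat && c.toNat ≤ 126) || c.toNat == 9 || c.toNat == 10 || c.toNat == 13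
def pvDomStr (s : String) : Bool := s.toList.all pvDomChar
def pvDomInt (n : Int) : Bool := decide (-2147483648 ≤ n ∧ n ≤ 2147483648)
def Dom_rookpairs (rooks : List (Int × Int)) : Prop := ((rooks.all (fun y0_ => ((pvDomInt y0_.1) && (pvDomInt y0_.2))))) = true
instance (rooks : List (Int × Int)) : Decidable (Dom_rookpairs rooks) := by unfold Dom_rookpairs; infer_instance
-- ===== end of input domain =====

-- B replaces A's two frequency dictionaries plus a separate pair-summation pass by one pass
-- collecting distinct rows/columns into sets and the closed form 2*n - len(rows) - len(cols) (objective: simpler).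

-- ===== PORT A =====
-- 'if key not in dct: dct[key] = 0' then 'dct[key] += 1'
def addrook (dct : PySem.Dict Int Int) (key : Int) : PySem.Dict Int Int :=
  let dct := if dct.contains key then dct else dct.insert key 0
  -- 'dct[key] += 1': key is present here, so d[key] = d.get(key, 0) + 1 — PySem.Dict.modify is exact
  dct.modify key 0 (· + 1)

-- 'pairs = 0; for key in dct: pairs += dct[key] - 1' (key always present, so getD key 0 is exact)
def countpairs (dct : PySem.Dict Int Int) : Int :=
  dct.keys.foldl (fun pairs key => pairs + (dct.getD key 0 - 1)) 0

def rookpairs (rooks : List (Int × Int)) : Int :=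
  let st := rooks.foldl
    (fun (st : PySem.Dict Int Int × PySem.Dict Int Int) ij =>
      (addrook st.1 ij.1, addrook st.2 ij.2))
    (PySem.Dict.empty, PySem.Dict.empty)
  countpairs st.1 + countpairs st.2

-- ===== PORT B =====
def rookpairs_alt (rooks : List (Int × Int)) : Int :=
  let st := rooks.foldl
    (fun (st : PySem.Set Int × PySem.Set Int × Int) ij =>
      (st.1.add ij.1, st.2.1.add ij.2, st.2.2 + 1))
    (PySem.Set.empty, PySem.Set.empty, 0)
  2 * st.2.2 - PySem.Set.len st.1 - PySem.Set.len st.2.1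

-- ===== PRECONDITION & SPEC =====
def Spec_rookpairs (rooks : List (Int × Int)) (out : Int) : Prop := out = rookpairs_alt rooks
instance (rooks : List (Int × Int)) (out : Int) : Decidable (Spec_rookpairs rooks out) := by unfold Spec_rookpairs; infer_instance

-- ===== CLAIM (what is proved, stated in full; the proofs are below) =====
def Claim_equal_rookpairs : Prop := ∀ (rooks : List (Int × Int)), Dom_rookpairs rooks → Spec_rookpairs rooks (rookpairs rooks)

-- ===== LEMMAS AND PROOFS =====

theorem getD_zero_of_not_contains (d : PySem.Dict Int Int) (k : Int)
    (h : d.contains k = false) : d.getD k 0 = 0 := by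
  have h' : d.get? k = none := by
    rw [PySem.Dict.get?_eq_none_iff_not_mem_keys]
    intro hm
    rw [← PySem.Dict.contains_iff_mem_keys] at hm
    simp [hm] at h
  simp [PySem.Dict.getD, h']

theorem keys_addrook (d : PySem.Dict Int Int) (k : Int) :
    (addrook d k).keys = PySem.Set.add d.keys k := by
  unfold addrook
  by_cases h : d.contains k = true
  · have hk : k ∈ d.keys := (PySem.Dict.contains_iff_mem_keys d k).mp h
    simp only [h, if_true, PySem.Dict.keys_modify,
      PySem.Dict.keys_insert_of_contains d _ h]
    simp [PySem.Set.add, PySem.Set.contains, hk]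
  · have h' : d.contains k = false := by simpa using h
    have hk : k ∉ d.keys := fun hm => by
      simp [(PySem.Dict.contains_iff_mem_keys d k).mpr hm] at h'
    have hc2 : (d.insert k 0).contains k = true := by
      rw [PySem.Dict.contains_iff_mem_keys, PySem.Dict.mem_keys_insert]
      exact Or.inl rfl
    simp only [h', if_false, Bool.false_eq_true, PySem.Dict.keys_modify,
      PySem.Dict.keys_insert_of_contains _ _ hc2,
      PySem.Dict.keys_insert_of_not_contains d _ h']
    simp [PySem.Set.add, PySem.Set.contains, hk]

theorem getD_addrook (d : PySem.Dict Int Int) (k v : Int) :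
    (addrook d k).getD v 0 = d.getD v 0 + (if v = k then 1 else 0) := by
  unfold addrook
  by_cases h : d.contains k = true
  · simp only [h, if_true, PySem.Dict.getD_modify]
    split_ifs with hv
    · subst hv; ring
    · ring
  · have h' : d.contains k = false := by simpa using h
    simp only [h', if_false, Bool.false_eq_true, PySem.Dict.getD_modify,
      PySem.Dict.getD_insert]
    split_ifs with hv
    · subst hv; rw [getD_zero_of_not_contains d v h']
    · ring

theorem fold_pair_eq (rooks : List (Int × Int)) :
    ∀ (di dj : PySem.Dict Int Int),
    rooks.foldl
      (fun (st : PySem.Dict Int Int × PySem.Dict Int Int) ij =>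
        (addrook st.1 ij.1, addrook st.2 ij.2)) (di, dj)
    = ((rooks.map (·.1)).foldl addrook di, (rooks.map (·.2)).foldl addrook dj) := by
  induction rooks with
  | nil => intro di dj; rfl
  | cons p t ih => intro di dj; simp [List.foldl_cons, ih]

theorem keys_fold_addrook (xs : List Int) :
    ∀ (d : PySem.Dict Int Int),
    (xs.foldl addrook d).keys = xs.foldl PySem.Set.add d.keys := by
  induction xs with
  | nil => intro d; rfl
  | cons x t ih => intro d; simp [List.foldl_cons, ih, keys_addrook]

theorem getD_fold_addrook (xs : List Int) :
    ∀ (d : PySem.Dict Int Int) (v : Int),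
    (xs.foldl addrook d).getD v 0 = d.getD v 0 + (xs.count v : Int) := by
  induction xs with
  | nil => intro d v; simp
  | cons x t ih =>
    intro d v
    rw [List.foldl_cons, ih, getD_addrook, List.count_cons]
    by_cases hv : v = x
    · subst hv; simp; ring
    · simp [hv, Ne.symm hv]

theorem sum_map_sub_one (l : List Int) (f : Int → Int) :
    (l.map (fun k => f k - 1)).sum = (l.map f).sum - l.length := by
  induction l with
  | nil => simp
  | cons x t ih => simp [ih]; ring

theorem sum_map_intCast (l : List Int) (c : Int → Nat) :
    (l.map (fun k => (c k : Int))).sum = ((l.map c).sum : Int) := by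
  induction l with
  | nil => simp
  | cons x t ih => simp [ih]

theorem perm_ofList_dedup (xs : List Int) :
    (PySem.Set.ofList xs).Perm xs.dedup := by
  apply List.perm_of_nodup_nodup_toFinset_eq (PySem.Set.nodup_ofList xs)
    xs.nodup_dedup
  apply Finset.ext
  intro a
  simp [List.mem_toFinset, PySem.Set.mem_ofList, List.mem_dedup]

theorem sum_count_ofList (xs : List Int) :
    ((PySem.Set.ofList xs).map (fun k => (xs.count k : Int))).sum = (xs.length : Int) := by
  have hperm := (perm_ofList_dedup xs).map (fun k => (xs.count k : Int))
  rw [hperm.sum_eq, sum_map_intCast]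
  rw [List.sum_map_count_dedup_eq_length]

theorem countpairs_fold (xs : List Int) :
    countpairs (xs.foldl addrook PySem.Dict.empty)
      = (xs.length : Int) - ((PySem.Set.ofList xs).length : Int) := by
  unfold countpairs
  rw [PySem.List.foldl_add]
  rw [keys_fold_addrook, PySem.Dict.keys_empty, ← PySem.Set.ofList_eq_foldl]
  have hmap : (PySem.Set.ofList xs).map
      (fun key => (xs.foldl addrook PySem.Dict.empty).getD key 0 - 1)
      = (PySem.Set.ofList xs).map (fun key => (xs.count key : Int) - 1) := by
    apply List.map_congr_left
    intro k _
    rw [getD_fold_addrook]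
    simp
  rw [hmap, sum_map_sub_one, sum_count_ofList]
  ring

theorem fold_triple_eq (rooks : List (Int × Int)) :
    ∀ (rows cols : PySem.Set Int) (n : Int),
    rooks.foldl
      (fun (st : PySem.Set Int × PySem.Set Int × Int) ij =>
        (st.1.add ij.1, st.2.1.add ij.2, st.2.2 + 1)) (rows, cols, n)
    = ((rooks.map (·.1)).foldl PySem.Set.add rows,
       (rooks.map (·.2)).foldl PySem.Set.add cols,
       n + rooks.length) := by
  induction rooks with
  | nil => intro rows cols n; simp
  | cons p t ih =>
    intro rows cols n
    rw [List.foldl_cons, ih]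
    simp [List.foldl_cons]
    ring

-- ===== VERDICT (by name: the statement is the Claim_ definition above) =====
theorem rookpairs_spec : Claim_equal_rookpairs := by
  intro rooks _
  unfold Spec_rookpairs rookpairs rookpairs_alt
  rw [fold_pair_eq, fold_triple_eq]
  simp only []
  rw [countpairs_fold, countpairs_fold]
  simp only [PySem.Set.len, PySem.Set.empty]
  rw [← PySem.Set.ofList_eq_foldl, ← PySem.Set.ofList_eq_foldl]
  simp only [List.length_map]
  ring
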